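-- pv_equiv track=rewrite | github.com/ctk-hq/ctk | services/backend/src/manifest_generation.py | _sequence_indent_four
-- ===== SOURCE A (Python) =====
-- def _sequence_indent_four(text: str) -> str:
--     result = ""
--     first_indent = True
--
--     for line in text.splitlines(True):
--         stripped = line.lstrip()
--         indent = len(line) - len(stripped)
--
--         if indent == 2 and not first_indent:
--             result += "\n"
--
--         result += line
--
--         if indent == 2 and first_indent:
--             first_indent = False
--
--     return result
-- ===== SOURCE B (Python) =====
-- def _sequence_indent_four(text: str) -> str:
--     lines = text.splitlines(True)
--     idx2 = [i for i, line in enumerate(lines) if len(line) - len(line.lstrip()) == 2]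
--     cuts = [0] + idx2[1:] + [len(lines)]
--     return "\n".join("".join(lines[a:b]) for a, b in zip(cuts, cuts[1:]))
-- ===== Notes on version B (the rewrite author's own statement) =====
-- stated objective: alternative
-- what changed: Replaces A's single stateful flag-loop that concatenates line by line with a staged segmentation: compute the indent-2 line indices, cut the kept-ends line list into contiguous segments at every indent-2 index except the first, and join the joined segments with a newline separator, so the blank line comes from the join rather than from per-line state.
import Mathlib
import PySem

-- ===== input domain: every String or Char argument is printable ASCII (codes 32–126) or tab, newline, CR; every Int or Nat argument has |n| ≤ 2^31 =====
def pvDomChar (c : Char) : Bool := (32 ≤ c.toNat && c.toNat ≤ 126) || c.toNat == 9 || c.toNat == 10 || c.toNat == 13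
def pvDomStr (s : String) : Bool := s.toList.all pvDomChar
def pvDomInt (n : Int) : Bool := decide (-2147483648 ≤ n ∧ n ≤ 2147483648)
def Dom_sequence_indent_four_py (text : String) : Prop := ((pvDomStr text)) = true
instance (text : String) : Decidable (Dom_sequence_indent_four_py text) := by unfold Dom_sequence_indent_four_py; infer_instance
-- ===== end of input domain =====

-- B replaces A's stateful flag loop by staged segmentation: cut the line list at every
-- indent-2 index except the first and join the joined segments with a newline separator; alternative decomposition, same cost.

-- shared helper: hand port of Python's str.splitlines(keepends=True); exact on the
-- domain's characters, where the only line boundaries are '\n', '\r' and '\r\n'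
def pvSplitKeepAux : List Char → List Char → List String
  | [], acc => if acc.isEmpty then [] else [String.ofList acc.reverse]
  | '\r' :: '\n' :: t, acc => String.ofList (acc.reverse ++ ['\r', '\n']) :: pvSplitKeepAux t []
  | '\r' :: t, acc => String.ofList (acc.reverse ++ ['\r']) :: pvSplitKeepAux t []
  | '\n' :: t, acc => String.ofList (acc.reverse ++ ['\n']) :: pvSplitKeepAux t []
  | c :: t, acc => pvSplitKeepAux t (c :: acc)

def pvSplitlinesKeep (s : String) : List String := pvSplitKeepAux s.toList []

-- ===== PORT A =====
def pvStepA (st : String × Bool) (line : String) : String × Bool :=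
  let stripped := PySem.Str.lstrip line
  let indent : Int := PySem.Str.len line - PySem.Str.len stripped
  let result := if indent == 2 && !st.2 then st.1 ++ "\n" else st.1
  let result := result ++ line
  let first := if indent == 2 && st.2 then false else st.2
  (result, first)

def sequence_indent_four_py (text : String) : String :=
  (List.foldl pvStepA ("", true) (pvSplitlinesKeep text)).1

-- ===== PORT B =====
def sequence_indent_four_py_alt (text : String) : String :=
  let lines := pvSplitlinesKeep text
  let idx2 := ((PySem.List.enumerate lines).filter
      (fun p => (PySem.Str.len p.2 - PySem.Str.len (PySem.Str.lstrip p.2)) == 2)).map Prod.fst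
  let cuts : List Int := 0 :: (idx2.drop 1 ++ [(lines.length : Int)])
  PySem.Str.join "\n" ((List.zip cuts (cuts.drop 1)).map
      (fun p => PySem.Str.join "" (PySem.List.slice lines (some p.1) (some p.2))))

-- ===== PRECONDITION & SPEC =====
def Spec_sequence_indent_four_py (text : String) (out : String) : Prop := out = sequence_indent_four_py_alt text
instance (text : String) (out : String) : Decidable (Spec_sequence_indent_four_py text out) := by unfold Spec_sequence_indent_four_py; infer_instance

-- ===== CLAIM (what is proved, stated in full; the proofs are below) =====
def Claim_equal_sequence_indent_four_py : Prop := ∀ (text : String), Dom_sequence_indent_four_py text → Spec_sequence_indent_four_py text (sequence_indent_four_py text)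

-- ===== LEMMAS AND PROOFS =====

-- is the line's computed indent 2?
def pvIs2 (l : String) : Bool := (PySem.Str.len l - PySem.Str.len (PySem.Str.lstrip l)) == 2

-- canonical form of the transformation: prefix "\n" on every indent-2 line once one was seen
def pvCanon : List String → Bool → String
  | [], _ => ""
  | l :: t, seen => (if pvIs2 l && seen then "\n" ++ l else l) ++ pvCanon t (seen || pvIs2 l)

-- indices (from offset n) of the indent-2 lines
def pvIdx2 : List String → Int → List Int
  | [], _ => []
  | l :: t, n => if pvIs2 l then n :: pvIdx2 t (n + 1) else pvIdx2 t (n + 1)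

-- segmentation: (current segment, later segments); a new segment opens at each indent-2
-- line once one indent-2 line has been seen
def pvSeg : Bool → List String → List String × List (List String)
  | _, [] => ([], [])
  | seen, l :: t =>
    if pvIs2 l && seen then
      let p := pvSeg true t
      ([], (l :: p.1) :: p.2)
    else
      let p := pvSeg (seen || pvIs2 l) t
      (l :: p.1, p.2)

-- slices of ls between consecutive cut points
def pvCutsSlices (ls : List String) : List Int → List (List String)
  | a :: b :: rest => PySem.List.slice ls (some a) (some b) :: pvCutsSlices ls (b :: rest)
  | _ => []

theorem pvJoin_nil_cons (x : String) (xs : List String) :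
    PySem.Str.join "" (x :: xs) = x ++ PySem.Str.join "" xs := by
  apply String.toList_injective
  cases xs <;> simp [PySem.Str.join, PySem.Chars.join, List.intercalate]

theorem pvJoin_one (s x : String) : PySem.Str.join s [x] = x := by
  apply String.toList_injective
  simp [PySem.Str.join, PySem.Chars.join, List.intercalate]

theorem pvJoin_two (s x y : String) (ys : List String) :
    PySem.Str.join s (x :: y :: ys) = x ++ s ++ PySem.Str.join s (y :: ys) := by
  apply String.toList_injective
  simp [PySem.Str.join, PySem.Chars.join, List.intercalate, String.toList_ofList]

theorem pvJoin_prepend (a b : String) (rest : List String) :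
    PySem.Str.join "\n" ((a ++ b) :: rest) = a ++ PySem.Str.join "\n" (b :: rest) := by
  cases rest with
  | nil => rw [pvJoin_one, pvJoin_one]
  | cons y ys => rw [pvJoin_two, pvJoin_two]; simp [String.append_assoc]

theorem pvStepA_eq (st : String × Bool) (line : String) :
    pvStepA st line =
      ((if pvIs2 line && !st.2 then st.1 ++ "\n" else st.1) ++ line,
       if pvIs2 line && st.2 then false else st.2) := by
  simp [pvStepA, pvIs2]

theorem pvFoldA (ls : List String) : ∀ (r : String) (f : Bool),
    (List.foldl pvStepA (r, f) ls).1 = r ++ pvCanon ls (!f) := by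
  induction ls with
  | nil => intro r f; simp [pvCanon]
  | cons l t ih =>
    intro r f
    rw [List.foldl_cons, pvStepA_eq]
    rw [ih]
    cases hf : f <;> cases h2 : pvIs2 l <;>
      simp [pvCanon, h2, String.append_assoc]

theorem pvMem_idx2_ge (t : List String) : ∀ (n j : Int), j ∈ pvIdx2 t n → n ≤ j := by
  induction t with
  | nil => intro n j h; simp [pvIdx2] at h
  | cons l t ih =>
    intro n j h
    by_cases h2 : pvIs2 l
    · simp [pvIdx2, h2] at h
      rcases h with h | h
      · omega
      · have := ih (n + 1) j h; omega
    · simp [pvIdx2, h2] at h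
      have := ih (n + 1) j h; omega

theorem pvIdx2_eq (ls : List String) : ∀ (n : Int),
    ((PySem.List.enumerate ls n).filter
      (fun p => (PySem.Str.len p.2 - PySem.Str.len (PySem.Str.lstrip p.2)) == 2)).map Prod.fst
      = pvIdx2 ls n := by
  induction ls with
  | nil => intro n; simp [PySem.List.enumerate_nil, pvIdx2]
  | cons l t ih =>
    intro n
    rw [PySem.List.enumerate_cons, List.filter_cons]
    by_cases h2 : pvIs2 l
    · have hb : ((PySem.Str.len l - PySem.Str.len (PySem.Str.lstrip l)) == 2) = true := h2
      simp only [hb, if_pos, List.map_cons, pvIdx2, h2]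
      rw [ih]
    · have hb : ((PySem.Str.len l - PySem.Str.len (PySem.Str.lstrip l)) == 2) = false := by
        simpa [pvIs2] using h2
      simp only [hb, Bool.false_eq_true, if_false, pvIdx2, h2]
      rw [ih]

-- shifting the enumeration offset shifts every index
theorem pvIdx2_shift (t : List String) : ∀ (n : Int),
    pvIdx2 t (n + 1) = (pvIdx2 t n).map (· + 1) := by
  induction t with
  | nil => intro n; simp [pvIdx2]
  | cons l t ih =>
    intro n
    by_cases h2 : pvIs2 l <;> simp [pvIdx2, h2, ih]

-- consecutive-cut slices ignore a prepended element when every cut is shifted by one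
theorem pvCutsSlices_tailshift (l : String) (t : List String) :
    ∀ (js : List Int), (∀ j ∈ js, 0 ≤ j) →
    pvCutsSlices (l :: t) (js.map (· + 1)) = pvCutsSlices t js := by
  intro js
  induction js with
  | nil => intro _; simp [pvCutsSlices]
  | cons a rest ih =>
    intro h
    cases rest with
    | nil => simp [pvCutsSlices]
    | cons b rest' =>
      have ha : 0 ≤ a := h a (by simp)
      have hb : 0 ≤ b := h b (by simp)
      simp only [List.map_cons, pvCutsSlices]
      have hm : (b + 1) :: List.map (fun x => x + 1) rest' = (b :: rest').map (· + 1) := by simp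
      rw [hm, ih (by intro j hj; exact h j (by simp [hj]))]
      congr 1
      rw [PySem.List.slice_toNat _ (by omega : (0:Int) ≤ a + 1) (by omega : (0:Int) ≤ b + 1),
          PySem.List.slice_toNat _ ha hb]
      have h1 : (a + 1).toNat = a.toNat + 1 := by omega
      have h2 : (b + 1).toNat = b.toNat + 1 := by omega
      simp [h1, h2, List.drop_succ_cons]

theorem pvCutsSlices_shift (l : String) (t : List String) (js : List Int)
    (h : ∀ j ∈ js, 0 ≤ j) :
    pvCutsSlices (l :: t) (0 :: js.map (· + 1)) =
      (match pvCutsSlices t (0 :: js) with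
        | [] => []
        | c :: r => (l :: c) :: r) := by
  cases js with
  | nil => simp [pvCutsSlices]
  | cons j rest =>
    have hj : 0 ≤ j := h j (by simp)
    simp only [List.map_cons, pvCutsSlices]
    have hm : (j + 1) :: List.map (fun x => x + 1) rest = (j :: rest).map (· + 1) := by simp
    rw [hm, pvCutsSlices_tailshift l t (j :: rest) h]
    congr 1
    rw [PySem.List.slice_toNat _ (by omega : (0:Int) ≤ (0:Int)) (by omega : (0:Int) ≤ j + 1),
        PySem.List.slice_toNat _ le_rfl hj]
    have h1 : (j + 1).toNat = j.toNat + 1 := by omega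
    simp [h1]

-- the cut points taken from the indent-2 indices carve exactly the pvSeg segments
theorem pvSlices_eq (ls : List String) : ∀ (seen : Bool),
    pvCutsSlices ls
      (0 :: ((if seen then pvIdx2 ls 0 else (pvIdx2 ls 0).drop 1) ++ [(ls.length : Int)]))
      = (pvSeg seen ls).1 :: (pvSeg seen ls).2 := by
  induction ls with
  | nil =>
    intro seen
    cases seen <;> simp [pvIdx2, pvCutsSlices, pvSeg, PySem.List.slice]
  | cons l t ih =>
    intro seen
    have hnn : ∀ j ∈ pvIdx2 t 0 ++ [(t.length : Int)], 0 ≤ j := by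
      intro j hj
      rcases List.mem_append.mp hj with h | h
      · exact pvMem_idx2_ge t 0 j h
      · simp at h; omega
    have hnn' : ∀ j ∈ (pvIdx2 t 0).drop 1 ++ [(t.length : Int)], 0 ≤ j := by
      intro j hj
      rcases List.mem_append.mp hj with h | h
      · exact pvMem_idx2_ge t 0 j (List.drop_subset 1 _ h)
      · simp at h; omega
    have hlen : ((l :: t).length : Int) = (t.length : Int) + 1 := by simp
    have hidx : pvIdx2 (l :: t) 0 =
        if pvIs2 l then 0 :: (pvIdx2 t 0).map (· + 1) else (pvIdx2 t 0).map (· + 1) := by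
      show (if pvIs2 l then (0 : Int) :: pvIdx2 t (0 + 1) else pvIdx2 t (0 + 1)) = _
      rw [pvIdx2_shift t 0]
    by_cases h2 : pvIs2 l
    · cases seen with
      | true =>
        -- empty first segment, l opens the next one
        rw [hidx, if_pos h2]
        simp only [if_true, hlen]
        have hmap : ((pvIdx2 t 0).map (· + 1)) ++ [(t.length : Int) + 1]
            = ((pvIdx2 t 0) ++ [(t.length : Int)]).map (· + 1) := by simp
        show pvCutsSlices (l :: t)
            ((0:Int) :: 0 :: (((pvIdx2 t 0).map (· + 1)) ++ [(t.length : Int) + 1])) = _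
        rw [hmap]
        show PySem.List.slice (l :: t) (some 0) (some 0) ::
            pvCutsSlices (l :: t) (0 :: ((pvIdx2 t 0) ++ [(t.length : Int)]).map (· + 1)) = _
        rw [pvCutsSlices_shift l t _ hnn]
        have := ih true
        simp only [if_true] at this
        rw [this]
        simp [pvSeg, h2, PySem.List.slice]
      | false =>
        -- l is the first indent-2 line: dropped from the cuts, prepended to the segment
        rw [hidx, if_pos h2]
        simp only [Bool.false_eq_true, if_false, List.drop_succ_cons, List.drop_zero, hlen]
        have hmap : ((pvIdx2 t 0).map (· + 1)) ++ [(t.length : Int) + 1]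
            = ((pvIdx2 t 0) ++ [(t.length : Int)]).map (· + 1) := by simp
        rw [hmap, pvCutsSlices_shift l t _ hnn]
        have := ih true
        simp only [if_true] at this
        rw [this]
        simp [pvSeg, h2]
    · -- l is not indent-2: prepended to the current segment
      rw [hidx, if_neg h2]
      have hseg : pvSeg seen (l :: t) =
          (l :: (pvSeg (seen || pvIs2 l) t).1, (pvSeg (seen || pvIs2 l) t).2) := by
        simp [pvSeg, h2]
      cases seen with
      | true =>
        simp only [if_true, hlen]
        have hmap : ((pvIdx2 t 0).map (· + 1)) ++ [(t.length : Int) + 1]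
            = ((pvIdx2 t 0) ++ [(t.length : Int)]).map (· + 1) := by simp
        rw [hmap, pvCutsSlices_shift l t _ hnn]
        have := ih true
        simp only [if_true] at this
        rw [this, hseg]
        simp [h2]
      | false =>
        simp only [Bool.false_eq_true, if_false, hlen]
        have hdropmap : ((pvIdx2 t 0).map (· + 1)).drop 1 = ((pvIdx2 t 0).drop 1).map (· + 1) := by
          rw [List.map_drop]
        rw [hdropmap]
        have hmap : (((pvIdx2 t 0).drop 1).map (· + 1)) ++ [(t.length : Int) + 1]
            = (((pvIdx2 t 0).drop 1) ++ [(t.length : Int)]).map (· + 1) := by simp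
        rw [hmap, pvCutsSlices_shift l t _ hnn']
        have := ih false
        rw [if_neg (by simp)] at this
        rw [this, hseg]
        simp [h2]

-- joining the segments with "\n" is exactly the canonical transformation
theorem pvChunksJoin (ls : List String) : ∀ (seen : Bool),
    PySem.Str.join "\n" (((pvSeg seen ls).1 :: (pvSeg seen ls).2).map (PySem.Str.join ""))
      = pvCanon ls seen := by
  induction ls with
  | nil =>
    intro seen
    simp only [pvSeg, List.map_cons, List.map_nil, pvCanon]
    rw [pvJoin_one]
    decide
  | cons l t ih =>
    intro seen
    by_cases hb : pvIs2 l && seen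
    · have h2 : pvIs2 l = true := by
        cases hp : pvIs2 l <;> simp [hp] at hb ⊢
      have hs : seen = true := by
        cases hp : seen <;> simp [hp] at hb ⊢
      subst hs
      simp only [pvSeg, hb, if_true, List.map_cons]
      rw [pvJoin_two]
      rw [pvJoin_nil_cons]
      have hemp : PySem.Str.join "" [] = "" := by decide
      rw [hemp]
      rw [pvJoin_prepend, ← List.map_cons, ih true]
      simp [pvCanon, h2, String.append_assoc]
    · simp only [pvSeg, hb, Bool.false_eq_true, if_false, List.map_cons]
      rw [pvJoin_nil_cons, pvJoin_prepend, ← List.map_cons, ih (seen || pvIs2 l)]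
      simp only [pvCanon, hb, Bool.false_eq_true, if_false]

-- ===== VERDICT (by name: the statement is the Claim_ definition above) =====
theorem sequence_indent_four_py_spec : Claim_equal_sequence_indent_four_py := by
  intro text _
  unfold Spec_sequence_indent_four_py sequence_indent_four_py sequence_indent_four_py_alt
  rw [pvFoldA]
  simp only [pvIdx2_eq]
  have hz : ∀ (ls : List String) (cs : List Int),
      (List.zip cs (cs.drop 1)).map
        (fun p => PySem.Str.join "" (PySem.List.slice ls (some p.1) (some p.2)))
        = (pvCutsSlices ls cs).map (PySem.Str.join "") := by
    intro ls cs
    induction cs with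
    | nil => simp [pvCutsSlices]
    | cons a rest ih =>
      cases rest with
      | nil => simp [pvCutsSlices]
      | cons b rest' => simp only [List.drop_succ_cons, List.drop_zero, List.zip_cons_cons,
          List.map_cons, pvCutsSlices] at ih ⊢; rw [ih]
  rw [hz]
  have hs := pvSlices_eq (pvSplitlinesKeep text) false
  rw [if_neg (by simp)] at hs
  rw [hs, pvChunksJoin]
  simp
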